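-- pv_equiv track=rewrite | github.com/ITKozak/alfy-bootcamp | Week2/Tuesday/ex3.py | check_monotonic_sequence
-- ===== SOURCE A (Python) =====
-- def check_monotonic_sequence(sequence: list) -> list:
--     '''Check if provided sequence is a valid monotonic sequence.'''
--     # Making copy of originall list for comparasions.
--     copy_list = sequence.copy()
--     copy_list.sort()
--     check = [False] * 4
--     # If sorted list equal to original - its monotonic up.
--     if copy_list == sequence:
--         check[0], check[1] = True, True
--         # There we are checking if adjacent number is equal.
--         # If they are - we have regular (non strong) monotonic.
--         for i in range(1, len(copy_list)):
--             if copy_list[i-1] == copy_list[i]: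
--                 check[1] = False
--                 break
--     # Doing previous part in revers to check down monotonic.
--     # Also helps to check for absolut monotonic sequence, when
--     # sequence could be up and down simultaneously.
--     copy_list.reverse()
--     if copy_list == sequence:
--         check[2], check[3] = True, True
--         for i in range(1, len(copy_list)):
--             if copy_list[i-1] == copy_list[i]:
--                 check[3] = False
--                 break
--     return check
-- ===== SOURCE B (Python) =====
-- def check_monotonic_sequence(sequence: list) -> list:
--     '''Check if provided sequence is a valid monotonic sequence.'''
--     # Single linear pass over adjacent pairs: record which relations occur.
--     has_lt = has_gt = has_eq = False
--     for a, b in zip(sequence, sequence[1:]):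
--         if a < b:
--             has_lt = True
--         elif a > b:
--             has_gt = True
--         else:
--             has_eq = True
--     asc = not has_gt
--     desc = not has_lt
--     return [asc, asc and not has_eq, desc, desc and not has_eq]
-- ===== Notes on version B (the rewrite author's own statement) =====
-- stated objective: faster
-- what changed: Instead of sorting a copy and comparing it (and its reverse) with the input, B makes one linear pass over adjacent pairs recording whether <, > or = ever occurs and derives the four flags from those three bits.
import Mathlib
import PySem

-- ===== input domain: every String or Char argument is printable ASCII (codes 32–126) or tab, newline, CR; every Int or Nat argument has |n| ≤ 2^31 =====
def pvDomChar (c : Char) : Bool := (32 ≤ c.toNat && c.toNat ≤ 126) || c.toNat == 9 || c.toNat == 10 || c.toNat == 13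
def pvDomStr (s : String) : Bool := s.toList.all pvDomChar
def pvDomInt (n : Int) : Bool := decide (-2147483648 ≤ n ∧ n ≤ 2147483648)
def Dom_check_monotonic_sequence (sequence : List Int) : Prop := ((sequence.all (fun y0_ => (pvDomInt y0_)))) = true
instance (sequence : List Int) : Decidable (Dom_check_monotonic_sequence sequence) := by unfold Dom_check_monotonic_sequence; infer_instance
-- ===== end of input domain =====

-- B replaces A's sort-and-compare by one linear pass over adjacent pairs (faster: O(n) vs O(n log n)).


-- ===== PORT A =====
-- the 'for i in range(1, len(l)): if l[i-1] == l[i]: …; break' loop; returns true iff the break fired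
def pvAdjEqLoop (l : List Int) (idxs : List Int) : Bool :=
  match idxs with
  | [] => false
  | i :: rest =>
    if PySem.List.pyGetD l (i - 1) 0 = PySem.List.pyGetD l i 0 then true
    else pvAdjEqLoop l rest

def check_monotonic_sequence (sequence : List Int) : List Bool :=
  let copy_list := PySem.List.sorted sequence (fun x => x) false
  let c01 : Bool × Bool :=
    if copy_list = sequence then
      (true, !pvAdjEqLoop copy_list (PySem.List.pyRange 1 copy_list.length 1))
    else (false, false)
  let copy_rev := copy_list.reverse
  let c23 : Bool × Bool :=
    if copy_rev = sequence then
      (true, !pvAdjEqLoop copy_rev (PySem.List.pyRange 1 copy_rev.length 1))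
    else (false, false)
  [c01.1, c01.2, c23.1, c23.2]

-- ===== PORT B =====
def check_monotonic_sequence_alt (sequence : List Int) : List Bool :=
  let s := (sequence.zip sequence.tail).foldl
    (fun (st : Bool × Bool × Bool) (p : Int × Int) =>
      if p.1 < p.2 then (true, st.2.1, st.2.2)
      else if p.2 < p.1 then (st.1, true, st.2.2)
      else (st.1, st.2.1, true)) (false, false, false)
  let asc := !s.2.1
  let desc := !s.1
  [asc, asc && !s.2.2, desc, desc && !s.2.2]

-- ===== PRECONDITION & SPEC =====
def Spec_check_monotonic_sequence (sequence : List Int) (out : List Bool) : Prop := out = check_monotonic_sequence_alt sequence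
instance (sequence : List Int) (out : List Bool) : Decidable (Spec_check_monotonic_sequence sequence out) := by unfold Spec_check_monotonic_sequence; infer_instance

-- ===== CLAIM (what is proved, stated in full; the proofs are below) =====
def Claim_equal_check_monotonic_sequence : Prop := ∀ (sequence : List Int), Dom_check_monotonic_sequence sequence → Spec_check_monotonic_sequence sequence (check_monotonic_sequence sequence)

-- ===== LEMMAS AND PROOFS =====

-- B's fold just accumulates, per component, whether the relation occurs among the pairs
theorem pvFoldFlags (ps : List (Int × Int)) (a b c : Bool) :
    ps.foldl (fun (st : Bool × Bool × Bool) (p : Int × Int) =>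
      if p.1 < p.2 then (true, st.2.1, st.2.2)
      else if p.2 < p.1 then (st.1, true, st.2.2)
      else (st.1, st.2.1, true)) (a, b, c)
    = (a || ps.any (fun p => decide (p.1 < p.2)),
       b || ps.any (fun p => decide (p.2 < p.1)),
       c || ps.any (fun p => decide (p.1 = p.2))) := by
  induction ps generalizing a b c with
  | nil => simp
  | cons p t ih =>
    rcases lt_trichotomy p.1 p.2 with h | h | h
    · simp [List.foldl_cons, h, not_lt_of_gt h, ne_of_lt h, ih]
    · simp [List.foldl_cons, h, ih]
    · simp [List.foldl_cons, h, not_lt_of_gt h, (ne_of_lt h).symm, ih]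

theorem pvChainLe_iff_any (l : List Int) :
    List.IsChain (· ≤ ·) l ↔ (l.zip l.tail).any (fun p => decide (p.2 < p.1)) = false := by
  induction l with
  | nil => simp
  | cons a t ih =>
    cases t with
    | nil => simp
    | cons b u =>
      rw [List.isChain_cons_cons]
      simp only [List.tail_cons, List.zip_cons_cons, List.any_cons] at *
      constructor
      · rintro ⟨h1, h2⟩; simp [not_lt.mpr h1, ih.mp h2]
      · intro h
        simp only [Bool.or_eq_false_iff, decide_eq_false_iff_not, not_lt] at h
        exact ⟨h.1, ih.mpr (by simpa using h.2)⟩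

theorem pvChainGe_iff_any (l : List Int) :
    List.IsChain (fun a b => b ≤ a) l ↔ (l.zip l.tail).any (fun p => decide (p.1 < p.2)) = false := by
  induction l with
  | nil => simp
  | cons a t ih =>
    cases t with
    | nil => simp
    | cons b u =>
      rw [List.isChain_cons_cons]
      simp only [List.tail_cons, List.zip_cons_cons, List.any_cons] at *
      constructor
      · rintro ⟨h1, h2⟩; simp [not_lt.mpr h1, ih.mp h2]
      · intro h
        simp only [Bool.or_eq_false_iff, decide_eq_false_iff_not, not_lt] at h
        exact ⟨h.1, ih.mpr (by simpa using h.2)⟩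

theorem pvSorted_eq_iff (l : List Int) :
    (PySem.List.sorted l (fun x => x) false = l) ↔ l.Pairwise (· ≤ ·) := by
  constructor
  · intro h
    have := PySem.List.sorted_pairwise l (fun x => x)
    rw [h] at this; exact this
  · intro h; exact PySem.List.sorted_eq_self_of_pairwise l (fun x => x) h

theorem pvSortedRev_eq_iff (l : List Int) :
    ((PySem.List.sorted l (fun x => x) false).reverse = l) ↔ l.Pairwise (fun a b => b ≤ a) := by
  constructor
  · intro h
    have hp := PySem.List.sorted_pairwise l (fun x => x)
    have : l.reverse.Pairwise (fun a b : Int => a ≤ b) := by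
      rw [← h, List.reverse_reverse]; exact hp
    rw [List.pairwise_reverse] at this
    exact this
  · intro h
    have hrev : l.reverse.Pairwise (fun a b : Int => a ≤ b) := by
      rw [List.pairwise_reverse]; exact h
    have hperm : l.reverse.Perm l := List.reverse_perm l
    have := PySem.List.sorted_id_eq_of_perm_of_pairwise l l.reverse hperm hrev
    rw [this, List.reverse_reverse]

-- A's break-loop over range(1, len) detects an equal adjacent pair
theorem pvAdjEqLoop_eq_any (l : List Int) (j : Nat) :
    pvAdjEqLoop l (PySem.List.pyRange ((j : Int) + 1) l.length 1)
      = ((l.drop j).zip (l.drop (j + 1))).any (fun p => decide (p.1 = p.2)) := by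
  by_cases h : j + 1 < l.length
  · rw [PySem.List.pyRange_one_cons (by exact_mod_cast h)]
    have hj : j < l.length := Nat.lt_of_succ_lt h
    rw [List.drop_eq_getElem_cons hj, List.drop_eq_getElem_cons h]
    simp only [pvAdjEqLoop, List.zip_cons_cons, List.any_cons]
    have e1 : ((j : Int) + 1) - 1 = (j : Int) := by ring
    have e2 : ((j : Int) + 1) = ((j + 1 : Nat) : Int) := by push_cast; ring
    rw [e1, e2, PySem.List.pyGetD_natCast, PySem.List.pyGetD_natCast,
        List.getD_eq_getElem _ _ hj, List.getD_eq_getElem _ _ h]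
    have e3 : ((j + 1 : Nat) : Int) + 1 = ((j + 1 : Nat) : Int) + 1 := rfl
    rw [show ((j + 1 : Nat) : Int) + 1 = (((j + 1) : Nat) : Int) + 1 from rfl]
    rw [← List.drop_eq_getElem_cons h]
    have ih := pvAdjEqLoop_eq_any l (j + 1)
    rw [List.drop_eq_getElem_cons h] at ih
    rw [ih, List.drop_eq_getElem_cons h]
    by_cases he : l[j] = l[j + 1] <;> simp [he]
  · rw [PySem.List.pyRange_one_eq_nil (by exact_mod_cast Nat.not_lt.mp h)]
    have : l.drop (j + 1) = [] := List.drop_eq_nil_of_le (Nat.not_lt.mp h)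
    simp [pvAdjEqLoop, this]
termination_by l.length - j

theorem pvAdjEqLoop_zero (l : List Int) :
    pvAdjEqLoop l (PySem.List.pyRange 1 l.length 1)
      = (l.zip l.tail).any (fun p => decide (p.1 = p.2)) := by
  have := pvAdjEqLoop_eq_any l 0
  simpa [List.drop_one] using this

-- ===== VERDICT (by name: the statement is the Claim_ definition above) =====
theorem check_monotonic_sequence_spec : Claim_equal_check_monotonic_sequence := by
  intro l _
  show check_monotonic_sequence l = check_monotonic_sequence_alt l
  unfold check_monotonic_sequence check_monotonic_sequence_alt
  rw [pvFoldFlags]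
  simp only []
  have hAsc : (PySem.List.sorted l (fun x => x) false = l)
      ↔ ((l.zip l.tail).any (fun p => decide (p.2 < p.1)) = false) := by
    rw [pvSorted_eq_iff, ← List.isChain_iff_pairwise, pvChainLe_iff_any]
  have hDesc : ((PySem.List.sorted l (fun x => x) false).reverse = l)
      ↔ ((l.zip l.tail).any (fun p => decide (p.1 < p.2)) = false) := by
    rw [pvSortedRev_eq_iff, ← List.isChain_iff_pairwise, pvChainGe_iff_any]
  by_cases h1 : PySem.List.sorted l (fun x => x) false = l <;>
  by_cases h2 : (PySem.List.sorted l (fun x => x) false).reverse = l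
  · have h1' := hAsc.mp h1
    have h2' := hDesc.mp h2
    rw [if_pos h1, if_pos h2, h1]
    rw [h1] at h2
    rw [h2]
    simp [h1', h2', pvAdjEqLoop_zero]
  · have h1' := hAsc.mp h1
    have h2' : ((l.zip l.tail).any fun p => decide (p.1 < p.2)) = true := by
      have := (not_iff_not.mpr hDesc).mp h2
      simpa using this
    rw [if_pos h1, if_neg h2, h1]
    simp [h1', h2', pvAdjEqLoop_zero]
  · have h2' := hDesc.mp h2
    have h1' : ((l.zip l.tail).any fun p => decide (p.2 < p.1)) = true := by
      have := (not_iff_not.mpr hAsc).mp h1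
      simpa using this
    rw [if_neg h1, if_pos h2, h2]
    simp [h1', h2', pvAdjEqLoop_zero]
  · have h1' : ((l.zip l.tail).any fun p => decide (p.2 < p.1)) = true := by
      have := (not_iff_not.mpr hAsc).mp h1
      simpa using this
    have h2' : ((l.zip l.tail).any fun p => decide (p.1 < p.2)) = true := by
      have := (not_iff_not.mpr hDesc).mp h2
      simpa using this
    rw [if_neg h1, if_neg h2]
    simp [h1', h2']
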